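-- pv_equiv track=rewrite | github.com/wegatron/cpp_rename_symbols | rename_symbols.py | increment_name
-- ===== SOURCE A (Python) =====
-- def increment_name(name):
--     result = []
--     for char in name:
--         if 'a' <= char <= 'z':
--             if char == 'z':
--                 result.append('a')
--             else:
--                 result.append(chr(ord(char) + 1))
--         elif 'A' <= char <= 'Z':
--             if char == 'Z':
--                 result.append('A')
--             else:
--                 result.append(chr(ord(char) + 1))
--         else:
--             result.append(char)
--     return ''.join(result)
-- ===== SOURCE B (Python) =====
-- def increment_name(name):
--     low = "abcdefghijklmnopqrstuvwxyz"
--     up = "ABCDEFGHIJKLMNOPQRSTUVWXYZ"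
--     src = low + up
--     dst = low[1:] + low[0] + up[1:] + up[0]
--     return "".join(dst[i] if (i := src.find(c)) >= 0 else c for c in name)
-- ===== Notes on version B (the rewrite author's own statement) =====
-- stated objective: alternative
-- what changed: B is a tr-style substitution: it builds parallel source/destination strings (dst = the two alphabets rotated left by one) and maps each character by looking up its position with src.find and reading dst at that position, replacing A's per-character range tests, wrap special-cases and chr/ord arithmetic.
import Mathlib
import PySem

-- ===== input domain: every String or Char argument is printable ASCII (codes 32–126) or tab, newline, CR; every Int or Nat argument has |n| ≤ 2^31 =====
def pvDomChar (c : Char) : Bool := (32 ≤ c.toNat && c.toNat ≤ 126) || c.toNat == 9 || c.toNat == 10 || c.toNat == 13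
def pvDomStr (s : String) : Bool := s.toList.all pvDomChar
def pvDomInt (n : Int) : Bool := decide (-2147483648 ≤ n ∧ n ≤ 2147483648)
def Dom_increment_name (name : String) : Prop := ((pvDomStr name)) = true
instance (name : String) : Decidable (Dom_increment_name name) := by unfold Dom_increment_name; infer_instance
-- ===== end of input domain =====

-- B is a tr-style substitution (parallel src/dst strings, dst = rotated alphabets, lookup by src.find)
-- replacing A's per-character range branches and chr/ord arithmetic; objective: alternative, same result.

-- ===== PORT A =====
-- per-character branch of A's loop body (the value appended to result)
def incStepA (c : Char) : Char :=
  if 'a' ≤ c ∧ c ≤ 'z' then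
    (if c = 'z' then 'a' else Char.ofNat (c.toNat + 1))
  else if 'A' ≤ c ∧ c ≤ 'Z' then
    (if c = 'Z' then 'A' else Char.ofNat (c.toNat + 1))
  else c

def increment_name (name : String) : String :=
  -- result = []; for char in name: result.append(...); return ''.join(result)
  String.ofList (name.toList.foldl (fun acc c => acc ++ [incStepA c]) [])

-- ===== PORT B =====
def incLow : List Char := "abcdefghijklmnopqrstuvwxyz".toList
def incUp : List Char := "ABCDEFGHIJKLMNOPQRSTUVWXYZ".toList
-- src = low + up
def incSrc : List Char := incLow ++ incUp
-- dst = low[1:] + low[0] + up[1:] + up[0]   (low[0]/up[0] guarded with a default only to stay total)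
def incDst : List Char :=
  PySem.List.slice incLow (some 1) none ++ [PySem.List.pyGetD incLow 0 'a'] ++
  PySem.List.slice incUp (some 1) none ++ [PySem.List.pyGetD incUp 0 'A']

def increment_name_alt (name : String) : String :=
  -- "".join(dst[i] if (i := src.find(c)) >= 0 else c for c in name)
  String.ofList (name.toList.map (fun c =>
    let i := PySem.Chars.find incSrc [c]
    if 0 ≤ i then PySem.List.pyGetD incDst i c else c))

-- ===== PRECONDITION & SPEC =====
def Spec_increment_name (name : String) (out : String) : Prop := out = increment_name_alt name
instance (name : String) (out : String) : Decidable (Spec_increment_name name out) := by unfold Spec_increment_name; infer_instance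

-- ===== CLAIM (what is proved, stated in full; the proofs are below) =====
def Claim_equal_increment_name : Prop := ∀ (name : String), Dom_increment_name name → Spec_increment_name name (increment_name name)

-- ===== LEMMAS AND PROOFS =====
def incStepB (c : Char) : Char :=
  let i := PySem.Chars.find incSrc [c]
  if 0 ≤ i then PySem.List.pyGetD incDst i c else c

set_option maxRecDepth 8192 in
theorem incStep_eq : ∀ i : Fin 128, incStepA (Char.ofNat i) = incStepB (Char.ofNat i) := by
  decide

theorem incStep_eq' (c : Char) (h : c.toNat < 128) : incStepA c = incStepB c := by
  have hv : c.toNat.isValidChar := c.valid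
  have : Char.ofNat c.toNat = c := by
    simp [Char.ofNat, hv, Char.ofNatAux]
    apply Char.ext
    rfl
  simpa [this] using incStep_eq ⟨c.toNat, h⟩

set_option maxRecDepth 8192 in
theorem increment_name_spec : Claim_equal_increment_name := by
  intro name hdom
  unfold Spec_increment_name increment_name increment_name_alt
  rw [PySem.List.foldl_append_singleton_eq_map]
  simp only [List.nil_append]
  congr 1
  apply List.map_congr_left
  intro c hc
  have hdc : pvDomChar c = true := (List.all_eq_true.mp hdom) c hc
  have h128 : c.toNat < 128 := by
    simp [pvDomChar] at hdc
    omega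
  exact incStep_eq' c h128
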